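-- pv_equiv track=rewrite | github.com/ZakMorrison2024/Disrello | disrello/disrello/disrello/model.py | resolve_board
-- ===== SOURCE A (Python) =====
-- from typing import Any, Dict, List, Optional, Tuple
--
-- def norm(s: Optional[str]) -> str:
--     return (s or "").strip().lower()
--
-- def resolve_board(store: Dict[str, Any], ref: str) -> Optional[Dict[str, Any]]:
--     r = norm(ref)
--     for b in store["boards"]:
--         if norm(b["id"]) == r:
--             return b
--     for b in store["boards"]:
--         if norm(b["name"]) == r:
--             return b
--     return None
-- ===== SOURCE B (Python) =====
-- from typing import Any, Dict, List, Optional, Tuple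
--
-- def norm(s: Optional[str]) -> str:
--     return (s or "").strip().lower()
--
-- def resolve_board(store: Dict[str, Any], ref: str) -> Optional[Dict[str, Any]]:
--     # Single pass: an id-match returns immediately (global id priority);
--     # the first name-match is recorded once and used only if no id matches.
--     r = norm(ref)
--     cand = None
--     for b in store["boards"]:
--         if norm(b["id"]) == r:
--             return b
--         if cand is None and norm(b.get("name")) == r:
--             cand = b
--     return cand
-- ===== Notes on version B (the rewrite author's own statement) =====
-- stated objective: alternative
-- what changed: The two sequential scans of store['boards'] are replaced by one single pass that returns immediately on an id-match and records the first name-match (via b.get, which norm already handles) as a fallback.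
import Mathlib
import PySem

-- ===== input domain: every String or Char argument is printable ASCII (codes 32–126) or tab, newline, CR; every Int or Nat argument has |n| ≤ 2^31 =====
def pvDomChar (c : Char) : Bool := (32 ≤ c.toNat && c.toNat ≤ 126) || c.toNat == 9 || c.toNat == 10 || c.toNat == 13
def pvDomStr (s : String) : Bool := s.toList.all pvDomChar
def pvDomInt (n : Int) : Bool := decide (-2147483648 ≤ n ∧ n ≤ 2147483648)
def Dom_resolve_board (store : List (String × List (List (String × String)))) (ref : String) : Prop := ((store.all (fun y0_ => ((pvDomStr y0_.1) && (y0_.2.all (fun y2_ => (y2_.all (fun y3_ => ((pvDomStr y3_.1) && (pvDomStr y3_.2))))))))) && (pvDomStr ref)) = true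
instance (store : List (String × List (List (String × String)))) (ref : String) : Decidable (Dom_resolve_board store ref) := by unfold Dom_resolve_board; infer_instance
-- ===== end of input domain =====

-- B replaces A's two sequential scans of the board list by one single pass that
-- returns immediately on an id-match and records the first name-match (read with
-- b.get, which norm already handles) as a fallback; return values agree on Pre_.

-- ===== PORT A =====
-- dict[k]: first-match lookup in the association list (KeyError = none, excluded by Pre_)
def pyLookup {ν : Type} (d : List (String × ν)) (k : String) : Option ν :=
  (d.find? (fun p => p.1 == k)).map (·.2)

-- norm(s) = (s or "").strip().lower(); an absent value (None) normalizes to ""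
def normP (s : String) : String := PySem.Str.lower (PySem.Str.strip s)

-- first for-loop of A: return the first board whose normalized "id" equals r
def findIdLoop (r : String) : List (List (String × String)) → Option (List (String × String))
  | [] => none
  | b :: rest =>
    match pyLookup b "id" with
    | none => none  -- KeyError (outside Pre_)
    | some v => if normP v == r then some b else findIdLoop r rest

-- second for-loop of A: return the first board whose normalized "name" equals r
def findNameLoop (r : String) : List (List (String × String)) → Option (List (String × String))
  | [] => none
  | b :: rest =>
    match pyLookup b "name" with
    | none => none  -- KeyError (outside Pre_)
    | some v => if normP v == r then some b else findNameLoop r rest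

def resolve_board (store : List (String × List (List (String × String)))) (ref : String) : Option (List (String × String)) :=
  match pyLookup store "boards" with
  | none => none  -- KeyError (outside Pre_)
  | some boards =>
    let r := normP ref
    match findIdLoop r boards with
    | some b => some b
    | none => findNameLoop r boards

-- ===== PORT B =====
-- the single loop of B, carrying the recorded first name-match `cand`;
-- b.get("name") is (pyLookup b "name").getD "" composed with normP (norm(None) = "")
def scanLoop (r : String) (cand : Option (List (String × String))) :
    List (List (String × String)) → Option (List (String × String))
  | [] => cand
  | b :: rest =>
    match pyLookup b "id" with
    | none => none  -- KeyError (outside Pre_)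
    | some iv =>
      if normP iv == r then some b
      else
        scanLoop r
          (if cand.isNone && (normP ((pyLookup b "name").getD "") == r) then some b else cand)
          rest

def resolve_board_alt (store : List (String × List (List (String × String)))) (ref : String) : Option (List (String × String)) :=
  match pyLookup store "boards" with
  | none => none  -- KeyError (outside Pre_)
  | some boards => scanLoop (normP ref) none boards

-- ===== PRECONDITION & SPEC =====
-- Pre_ is exactly where the Python A returns: the "boards" key exists and either
-- some board in the prefix of boards carrying an "id" key id-matches (the first
-- loop returns before any KeyError), or every board has an "id" key and the second
-- loop terminates (every board has a "name" key, or a name-match occurs within the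
-- prefix of boards carrying one); everywhere else A raises KeyError.
def Pre_resolve_board (store : List (String × List (List (String × String)))) (ref : String) : Prop :=
  (pyLookup store "boards").isSome = true ∧
  ((∃ b ∈ ((pyLookup store "boards").getD []).takeWhile (fun b => (pyLookup b "id").isSome),
      normP ((pyLookup b "id").getD "") = normP ref)
   ∨ ((∀ b ∈ (pyLookup store "boards").getD [], (pyLookup b "id").isSome = true) ∧
      ((∀ b ∈ (pyLookup store "boards").getD [], (pyLookup b "name").isSome = true)
       ∨ ∃ b ∈ ((pyLookup store "boards").getD []).takeWhile (fun b => (pyLookup b "name").isSome),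
           normP ((pyLookup b "name").getD "") = normP ref)))
instance (store : List (String × List (List (String × String)))) (ref : String) : Decidable (Pre_resolve_board store ref) := by unfold Pre_resolve_board; infer_instance

def pvWitness_resolve_board : (List (String × List (List (String × String)))) × String :=
  ([("boards", [[("id", "B1"), ("name", "Main")], [("id", "B2"), ("name", "Dev")]])], " main ")

def Spec_resolve_board (store : List (String × List (List (String × String)))) (ref : String) (out : Option (List (String × String))) : Prop := out = resolve_board_alt store ref
instance (store : List (String × List (List (String × String)))) (ref : String) (out : Option (List (String × String))) : Decidable (Spec_resolve_board store ref out) := by unfold Spec_resolve_board; infer_instance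

-- ===== CLAIM (what is proved, stated in full; the proofs are below) =====
def Claim_equal_resolve_board : Prop := ∀ (store : List (String × List (List (String × String)))) (ref : String), Dom_resolve_board store ref → Pre_resolve_board store ref → Spec_resolve_board store ref (resolve_board store ref)

-- ===== LEMMAS AND PROOFS =====

-- if A's first loop finds an id-match, B's single pass returns the same board
-- whatever name-candidate it has recorded so far
theorem scanLoop_of_id_found (r : String) (bs : List (List (String × String)))
    (x : List (String × String)) (h : findIdLoop r bs = some x) :
    ∀ cand, scanLoop r cand bs = some x := by
  induction bs with
  | nil => simp [findIdLoop] at h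
  | cons b rest ih =>
    intro cand
    simp only [findIdLoop] at h
    simp only [scanLoop]
    cases hiv : pyLookup b "id" with
    | none => rw [hiv] at h; exact absurd h (by simp)
    | some iv =>
      rw [hiv] at h
      by_cases hm : (normP iv == r) = true
      · simp only [hm, if_true] at h ⊢; exact h
      · simp only [hm, Bool.false_eq_true, if_false] at h ⊢; exact ih h _

-- an id-match inside the prefix of boards carrying an "id" key makes A's first loop succeed
theorem findIdLoop_isSome_of_prefix_match (r : String) (bs : List (List (String × String)))
    (h : ∃ b ∈ bs.takeWhile (fun b => (pyLookup b "id").isSome),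
      normP ((pyLookup b "id").getD "") = r) :
    (findIdLoop r bs).isSome = true := by
  induction bs with
  | nil => simp at h
  | cons b rest ih =>
    simp only [findIdLoop]
    cases hiv : pyLookup b "id" with
    | none => simp [List.takeWhile, hiv] at h
    | some iv =>
      by_cases hm : (normP iv == r) = true
      · simp [hm]
      · simp only [hm, Bool.false_eq_true, if_false]
        apply ih
        simp only [List.takeWhile, hiv, Option.isSome_some, List.mem_cons] at h
        obtain ⟨b', hb', hb'm⟩ := h
        cases hb' with
        | inl he => subst he; rw [hiv] at hb'm; simp at hb'm hm; exact absurd hb'm hm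
        | inr ht => exact ⟨b', ht, hb'm⟩

-- if A's first loop exhausts the boards (all ids present), no id anywhere matches
theorem no_match_of_findIdLoop_none (r : String) (bs : List (List (String × String)))
    (hid : ∀ b ∈ bs, (pyLookup b "id").isSome = true)
    (h : findIdLoop r bs = none) :
    ∀ b ∈ bs, ¬ (normP ((pyLookup b "id").getD "") = r) := by
  induction bs with
  | nil => simp
  | cons b rest ih =>
    obtain ⟨iv, hiv⟩ := Option.isSome_iff_exists.mp (hid b (List.mem_cons_self ..))
    simp only [findIdLoop, hiv] at h
    by_cases hm : (normP iv == r) = true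
    · simp [hm] at h
    · simp only [hm, Bool.false_eq_true, if_false] at h
      intro b' hb'
      cases hb' with
      | head => rw [hiv]; simpa using hm
      | tail _ ht => exact ih (fun c hc => hid c (List.mem_cons_of_mem _ hc)) h b' ht

-- with a recorded candidate and no id-match anywhere, B's pass returns the candidate
theorem scanLoop_some_cand (r : String) (bs : List (List (String × String)))
    (hid : ∀ b ∈ bs, (pyLookup b "id").isSome = true)
    (hnm : ∀ b ∈ bs, ¬ (normP ((pyLookup b "id").getD "") = r)) :
    ∀ x, scanLoop r (some x) bs = some x := by
  induction bs with
  | nil => intro x; rfl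
  | cons b rest ih =>
    intro x
    obtain ⟨iv, hiv⟩ := Option.isSome_iff_exists.mp (hid b (List.mem_cons_self ..))
    have hbm := hnm b (List.mem_cons_self ..)
    rw [hiv] at hbm
    simp only [scanLoop, hiv]
    have : (normP iv == r) = false := by simpa using hbm
    simp only [this, Bool.false_eq_true, if_false, Option.isNone_some, Bool.false_and, if_false]
    exact ih (fun c hc => hid c (List.mem_cons_of_mem _ hc))
      (fun c hc => hnm c (List.mem_cons_of_mem _ hc)) x

-- with no candidate and no id-match anywhere, B's pass computes A's second loop,
-- provided that loop terminates (all names present, or a name-match in the named prefix)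
theorem scanLoop_none_cand (r : String) (bs : List (List (String × String)))
    (hid : ∀ b ∈ bs, (pyLookup b "id").isSome = true)
    (hnm : ∀ b ∈ bs, ¬ (normP ((pyLookup b "id").getD "") = r))
    (hC : (∀ b ∈ bs, (pyLookup b "name").isSome = true)
      ∨ ∃ b ∈ bs.takeWhile (fun b => (pyLookup b "name").isSome),
          normP ((pyLookup b "name").getD "") = r) :
    scanLoop r none bs = findNameLoop r bs := by
  induction bs with
  | nil => rfl
  | cons b rest ih =>
    obtain ⟨iv, hiv⟩ := Option.isSome_iff_exists.mp (hid b (List.mem_cons_self ..))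
    have hbm := hnm b (List.mem_cons_self ..)
    rw [hiv] at hbm
    have hivf : (normP iv == r) = false := by simpa using hbm
    have hidr : ∀ c ∈ rest, (pyLookup c "id").isSome = true :=
      fun c hc => hid c (List.mem_cons_of_mem _ hc)
    have hnmr : ∀ c ∈ rest, ¬ (normP ((pyLookup c "id").getD "") = r) :=
      fun c hc => hnm c (List.mem_cons_of_mem _ hc)
    simp only [scanLoop, findNameLoop, hiv, hivf, Bool.false_eq_true, if_false,
      Option.isNone_none, Bool.true_and]
    cases hnv : pyLookup b "name" with
    | none =>
      -- A's second loop raises here: excluded by hC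
      exfalso
      cases hC with
      | inl hall => have := hall b (List.mem_cons_self ..); rw [hnv] at this; simp at this
      | inr hex => simp [List.takeWhile, hnv] at hex
    | some nv =>
      by_cases hm : (normP nv == r) = true
      · simp only [Option.getD_some, hm, if_true]
        exact scanLoop_some_cand r rest hidr hnmr b
      · simp only [Option.getD_some, hm, Bool.false_eq_true, if_false]
        apply ih hidr hnmr
        cases hC with
        | inl hall => exact Or.inl (fun c hc => hall c (List.mem_cons_of_mem _ hc))
        | inr hex =>
          apply Or.inr
          simp only [List.takeWhile, hnv, Option.isSome_some, List.mem_cons] at hex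
          obtain ⟨b', hb', hb'm⟩ := hex
          cases hb' with
          | inl he => subst he; rw [hnv] at hb'm; simp at hb'm; exact absurd hb'm (by simpa using hm)
          | inr ht => exact ⟨b', ht, hb'm⟩

-- ===== VERDICT (by name: the statement is the Claim_ definition above) =====
theorem resolve_board_spec : Claim_equal_resolve_board := by
  intro store ref _ hpre
  obtain ⟨hb, hrest⟩ := hpre
  obtain ⟨boards, hboards⟩ := Option.isSome_iff_exists.mp hb
  unfold Spec_resolve_board resolve_board resolve_board_alt
  rw [hboards]
  rw [hboards] at hrest
  simp only [Option.getD_some] at hrest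
  dsimp only
  cases hF : findIdLoop (normP ref) boards with
  | some x => exact (scanLoop_of_id_found _ _ _ hF none).symm
  | none =>
    cases hrest with
    | inl hM =>
      have := findIdLoop_isSome_of_prefix_match (normP ref) boards hM
      rw [hF] at this; simp at this
    | inr h2 =>
      obtain ⟨hid, hC⟩ := h2
      have hnm := no_match_of_findIdLoop_none (normP ref) boards hid hF
      exact (scanLoop_none_cand (normP ref) boards hid hnm hC).symm
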